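-- pv_equiv track=rewrite | github.com/synwix/bil441proje | arama_algoritmaları_37.py | find_pattern
-- ===== SOURCE A (Python) =====
-- def check_region(region, pattern):
--     diff = 0
--     for i in range(len(pattern)):
--         for j in range(len(pattern[0])):
--             if region[i][j] != pattern[i][j]:
--                 diff += 1
--     return diff
--
-- def find_pattern(grid, pattern):
--     rows, cols = len(grid), len(grid[0])
--     pattern_rows, pattern_cols = len(pattern), len(pattern[0])
--     max_score = pattern_rows * pattern_cols
--
--     for i in range(rows - pattern_rows + 1):
--         for j in range(cols - pattern_cols + 1):
--             region = [row[j:j+pattern_cols] for row in grid[i:i+pattern_rows]]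
--             if all(region[r][c] == pattern[r][c] for r in range(pattern_rows)
--                    for c in range(pattern_cols)):
--                 return max_score
--
--     min_diff = float('inf')
--     for i in range(rows - pattern_rows + 1):
--         for j in range(cols - pattern_cols + 1):
--             region = [row[j:j+pattern_cols] for row in grid[i:i+pattern_rows]]
--             diff = check_region(region, pattern)
--             min_diff = min(min_diff, diff)
--     return max_score - min_diff
-- ===== SOURCE B (Python) =====
-- def find_pattern(grid, pattern):
--     rows, cols = len(grid), len(grid[0])
--     pattern_rows, pattern_cols = len(pattern), len(pattern[0])
--
--     best = float('inf')
--     for i in range(rows - pattern_rows + 1):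
--         for j in range(cols - pattern_cols + 1):
--             d = sum(1 for r in range(pattern_rows) for c in range(pattern_cols)
--                     if grid[i + r][j + c] != pattern[r][c])
--             if d < best:
--                 best = d
--     return pattern_rows * pattern_cols - best
-- ===== Notes on version B (the rewrite author's own statement) =====
-- stated objective: simpler
-- what changed: B replaces A's two full scans (an exact-match scan with early return, then a separate min-mismatch scan that rebuilds every region via slicing) by one pass over all placements that counts mismatches by direct grid indexing and keeps the running minimum, returning max_score - best; an exact match gives diff 0 and yields max_score naturally.
-- outside the precondition, e.g. on find_pattern([[1, 2], [3]], [[1]]): A returns 1, B raises IndexError; on find_pattern([[1]], [[1], [2]]): A returns -inf, B returns -inf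
import Mathlib
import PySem

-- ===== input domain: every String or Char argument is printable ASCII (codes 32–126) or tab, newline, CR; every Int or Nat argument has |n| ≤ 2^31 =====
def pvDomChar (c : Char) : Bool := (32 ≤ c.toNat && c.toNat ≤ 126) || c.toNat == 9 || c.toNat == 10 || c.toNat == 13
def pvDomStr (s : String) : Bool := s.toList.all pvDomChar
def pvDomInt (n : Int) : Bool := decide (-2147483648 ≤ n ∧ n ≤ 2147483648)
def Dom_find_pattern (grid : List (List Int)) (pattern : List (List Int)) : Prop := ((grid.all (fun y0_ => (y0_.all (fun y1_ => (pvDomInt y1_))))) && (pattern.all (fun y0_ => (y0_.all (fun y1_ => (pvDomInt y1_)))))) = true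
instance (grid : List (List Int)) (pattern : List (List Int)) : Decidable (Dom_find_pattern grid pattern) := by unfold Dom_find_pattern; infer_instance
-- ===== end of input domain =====

-- B drops A's separate exact-match scan and region slicing: one pass over all placements
-- keeping the minimum mismatch count by direct indexing (objective: simpler; same asymptotic cost).

-- ===== PORT A =====
-- m[i][j] with Python indexing; defaults are never used inside Pre_
def pvIdx (m : List (List Int)) (i j : Int) : Int :=
  PySem.List.pyGetD (PySem.List.pyGetD m i []) j 0

def check_region (region pattern : List (List Int)) : Int :=
  (PySem.List.pyRange 0 (pattern.length : Int) 1).foldl (fun diff i =>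
    (PySem.List.pyRange 0 ((pattern.headD []).length : Int) 1).foldl (fun diff j =>
      if pvIdx region i j ≠ pvIdx pattern i j then diff + 1 else diff) diff) 0

-- the region comprehension [row[j:j+pc] for row in grid[i:i+pr]]
def pvRegion (grid : List (List Int)) (i j pr pc : Int) : List (List Int) :=
  (PySem.List.slice grid (some i) (some (i + pr))).map
    (fun row => PySem.List.slice row (some j) (some (j + pc)))

def find_pattern (grid : List (List Int)) (pattern : List (List Int)) : Int :=
  let rows : Int := grid.length
  let cols : Int := (grid.headD []).length
  let pr : Int := pattern.length
  let pc : Int := (pattern.headD []).length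
  let max_score : Int := pr * pc
  if (PySem.List.pyRange 0 (rows - pr + 1) 1).any (fun i =>
       (PySem.List.pyRange 0 (cols - pc + 1) 1).any (fun j =>
         (PySem.List.pyRange 0 pr 1).all (fun r =>
           (PySem.List.pyRange 0 pc 1).all (fun c =>
             pvIdx (pvRegion grid i j pr pc) r c == pvIdx pattern r c))))
  then max_score
  else
    match (PySem.List.pyRange 0 (rows - pr + 1) 1).foldl (fun acc i =>
        (PySem.List.pyRange 0 (cols - pc + 1) 1).foldl (fun acc j =>
          let d := check_region (pvRegion grid i j pr pc) pattern
          match acc with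
          | none => some d
          | some m => some (min m d)) acc) (none : Option Int) with
    | some m => max_score - m
    | none => 0    -- Python returns the float -inf here (no placement fits); excluded by Pre_

-- ===== PORT B =====
-- sum(1 for r in range(pr) for c in range(pc) if grid[i+r][j+c] != pattern[r][c])
def pvCount (grid pattern : List (List Int)) (i j : Int) : Int :=
  (PySem.List.pyRange 0 (pattern.length : Int) 1).foldl (fun s r =>
    (PySem.List.pyRange 0 ((pattern.headD []).length : Int) 1).foldl (fun s c =>
      if pvIdx grid (i + r) (j + c) ≠ pvIdx pattern r c then s + 1 else s) s) 0

def find_pattern_alt (grid : List (List Int)) (pattern : List (List Int)) : Int :=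
  let rows : Int := grid.length
  let cols : Int := (grid.headD []).length
  let pr : Int := pattern.length
  let pc : Int := (pattern.headD []).length
  match (PySem.List.pyRange 0 (rows - pr + 1) 1).foldl (fun acc i =>
      (PySem.List.pyRange 0 (cols - pc + 1) 1).foldl (fun acc j =>
        let d := pvCount grid pattern i j
        match acc with
        | none => some d
        | some b => if d < b then some d else some b) acc) (none : Option Int) with
  | some b => pr * pc - b
  | none => 0    -- best stayed float('inf'): Python returns the float -inf; excluded by Pre_

-- ===== PRECONDITION & SPEC =====
-- Pre_ restricts to the natural domain: nonempty grid and pattern, pattern fitting vertically, and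
-- (unless the pattern's first row is empty, when no cell is ever read) rows at least as long as their
-- first row (on shorter ragged rows A or B raises IndexError) with the pattern fitting horizontally;
-- when the pattern is too large A returns the float -inf, not an int, so those inputs are excluded.
def Pre_find_pattern (grid : List (List Int)) (pattern : List (List Int)) : Prop :=
  grid ≠ [] ∧ pattern ≠ [] ∧ pattern.length ≤ grid.length ∧
  ((pattern.headD []).length = 0 ∨
    ((∀ row ∈ grid, (grid.headD []).length ≤ row.length) ∧
     (∀ row ∈ pattern, (pattern.headD []).length ≤ row.length) ∧
     (pattern.headD []).length ≤ (grid.headD []).length))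

instance (grid : List (List Int)) (pattern : List (List Int)) : Decidable (Pre_find_pattern grid pattern) := by
  unfold Pre_find_pattern; infer_instance

def pvWitness_find_pattern : List (List Int) × List (List Int) := ([[1, 2], [3, 4]], [[9]])

def Spec_find_pattern (grid : List (List Int)) (pattern : List (List Int)) (out : Int) : Prop := out = find_pattern_alt grid pattern
instance (grid : List (List Int)) (pattern : List (List Int)) (out : Int) : Decidable (Spec_find_pattern grid pattern out) := by unfold Spec_find_pattern; infer_instance

-- ===== CLAIM (what is proved, stated in full; the proofs are below) =====
def Claim_equal_find_pattern : Prop := ∀ (grid : List (List Int)) (pattern : List (List Int)), Dom_find_pattern grid pattern → Pre_find_pattern grid pattern → Spec_find_pattern grid pattern (find_pattern grid pattern)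

-- ===== LEMMAS AND PROOFS =====

lemma pvIdx_region_eq (grid : List (List Int)) (i j r c : Int) (prN pcN : Nat)
    (hi : 0 ≤ i) (hj : 0 ≤ j) (hr : 0 ≤ r) (hc : 0 ≤ c)
    (hipr : i + prN ≤ grid.length) (hrpr : r < prN) (hcpc : c < pcN)
    (hrow : ∀ row ∈ grid, j + pcN ≤ (row.length : Int)) :
    pvIdx (pvRegion grid i j (prN : Int) (pcN : Int)) r c = pvIdx grid (i + r) (j + c) := by
  lift i to ℕ using hi with iN
  lift j to ℕ using hj with jN
  lift r to ℕ using hr with rN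
  lift c to ℕ using hc with cN
  have hipr' : iN + prN ≤ grid.length := by exact_mod_cast hipr
  have hrpr' : rN < prN := by exact_mod_cast hrpr
  have hcpc' : cN < pcN := by exact_mod_cast hcpc
  unfold pvIdx pvRegion
  rw [PySem.List.slice_natCast_add]
  have hlen : ((grid.drop iN).take prN).length = prN := by
    simp [List.length_take, List.length_drop]; omega
  have hmem : grid[iN + rN]'(by omega) ∈ grid := List.getElem_mem _
  have hrowlen : jN + pcN ≤ (grid[iN + rN]'(by omega)).length := by
    exact_mod_cast hrow _ hmem
  have h1 : PySem.List.pyGetD (((grid.drop iN).take prN).map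
      (fun row => PySem.List.slice row (some (jN : Int)) (some ((jN : Int) + (pcN : Int))))) (rN : Int) []
      = PySem.List.slice (grid[iN + rN]'(by omega)) (some (jN : Int)) (some ((jN : Int) + (pcN : Int))) := by
    rw [PySem.List.pyGetD_natCast]
    rw [List.getD_eq_getElem _ _ (by rw [List.length_map, hlen]; omega)]
    simp [List.getElem_take, List.getElem_drop]
  rw [h1, PySem.List.slice_natCast_add]
  have h2 : PySem.List.pyGetD ((grid[iN + rN]'(by omega)).drop jN |>.take pcN) (cN : Int) 0
      = (grid[iN + rN]'(by omega))[jN + cN]'(by omega) := by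
    rw [PySem.List.pyGetD_natCast]
    rw [List.getD_eq_getElem _ _ (by simp [List.length_take, List.length_drop]; omega)]
    simp [List.getElem_take, List.getElem_drop]
  rw [h2]
  have h3 : PySem.List.pyGetD grid ((iN : Int) + (rN : Int)) [] = grid[iN + rN]'(by omega) := by
    rw [show ((iN : Int) + (rN : Int)) = ((iN + rN : Nat) : Int) by push_cast; ring]
    rw [PySem.List.pyGetD_natCast, List.getD_eq_getElem _ _ (by omega)]
  rw [h3]
  rw [show ((jN : Int) + (cN : Int)) = ((jN + cN : Nat) : Int) by push_cast; ring]
  rw [PySem.List.pyGetD_natCast, List.getD_eq_getElem _ _ (by omega)]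

lemma pvCount_eq (grid pattern : List (List Int)) (i j : Int) :
    pvCount grid pattern i j
      = ((PySem.List.pyRange 0 (pattern.length : Int) 1).map (fun r =>
          (((PySem.List.pyRange 0 ((pattern.headD []).length : Int) 1).countP
            (fun c => decide (pvIdx grid (i + r) (j + c) ≠ pvIdx pattern r c))) : Int))).sum := by
  unfold pvCount
  have h : ∀ (r s : Int),
      (PySem.List.pyRange 0 ((pattern.headD []).length : Int) 1).foldl (fun s c =>
        if pvIdx grid (i + r) (j + c) ≠ pvIdx pattern r c then s + 1 else s) s
      = s + (((PySem.List.pyRange 0 ((pattern.headD []).length : Int) 1).countP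
            (fun c => decide (pvIdx grid (i + r) (j + c) ≠ pvIdx pattern r c))) : Int) := by
    intro r s
    exact PySem.List.foldl_ite_add_one _ _ _
  calc _ = (PySem.List.pyRange 0 (pattern.length : Int) 1).foldl (fun s r =>
            s + (((PySem.List.pyRange 0 ((pattern.headD []).length : Int) 1).countP
            (fun c => decide (pvIdx grid (i + r) (j + c) ≠ pvIdx pattern r c))) : Int)) 0 :=
        PySem.List.foldl_congr_mem _ _ _ _ (fun acc r _ => h r acc)
    _ = _ := by rw [PySem.List.foldl_add]; simp

lemma pvCount_nonneg (grid pattern : List (List Int)) (i j : Int) :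
    0 ≤ pvCount grid pattern i j := by
  rw [pvCount_eq]
  apply List.sum_nonneg
  intro x hx
  simp only [List.mem_map] at hx
  obtain ⟨r, _, rfl⟩ := hx
  positivity

lemma pvCount_eq_zero_iff (grid pattern : List (List Int)) (i j : Int) :
    pvCount grid pattern i j = 0
      ↔ ∀ r ∈ PySem.List.pyRange 0 (pattern.length : Int) 1,
          ∀ c ∈ PySem.List.pyRange 0 ((pattern.headD []).length : Int) 1,
            pvIdx grid (i + r) (j + c) = pvIdx pattern r c := by
  rw [pvCount_eq]
  rw [show ((PySem.List.pyRange 0 (pattern.length : Int) 1).map (fun r =>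
          (((PySem.List.pyRange 0 ((pattern.headD []).length : Int) 1).countP
            (fun c => decide (pvIdx grid (i + r) (j + c) ≠ pvIdx pattern r c))) : Int))).sum
      = (((PySem.List.pyRange 0 (pattern.length : Int) 1).map (fun r =>
          ((PySem.List.pyRange 0 ((pattern.headD []).length : Int) 1).countP
            (fun c => decide (pvIdx grid (i + r) (j + c) ≠ pvIdx pattern r c))))).sum : Int) by
    rw [Nat.cast_list_sum, List.map_map]; rfl]
  rw [show ((((PySem.List.pyRange 0 (pattern.length : Int) 1).map (fun r =>
          ((PySem.List.pyRange 0 ((pattern.headD []).length : Int) 1).countP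
            (fun c => decide (pvIdx grid (i + r) (j + c) ≠ pvIdx pattern r c))))).sum : Int) = 0)
      ↔ (((PySem.List.pyRange 0 (pattern.length : Int) 1).map (fun r =>
          ((PySem.List.pyRange 0 ((pattern.headD []).length : Int) 1).countP
            (fun c => decide (pvIdx grid (i + r) (j + c) ≠ pvIdx pattern r c))))).sum = 0) by
    exact_mod_cast Iff.rfl]
  rw [List.sum_eq_zero_iff]
  constructor
  · intro h r hr c hc
    have := h _ (List.mem_map_of_mem hr)
    rw [List.countP_eq_zero] at this
    have := this c hc
    simpa using this
  · intro h x hx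
    simp only [List.mem_map] at hx
    obtain ⟨r, hr, rfl⟩ := hx
    rw [List.countP_eq_zero]
    intro c hc
    simpa using h r hr c hc

lemma pvFoldl_foldl_flatMap {α β σ : Type} (l1 : List α) (l2 : List β) (g : σ → α → β → σ) (init : σ) :
    l1.foldl (fun acc i => l2.foldl (fun acc j => g acc i j) acc) init
      = (l1.flatMap (fun i => l2.map (fun j => (i, j)))).foldl (fun acc p => g acc p.1 p.2) init := by
  induction l1 generalizing init with
  | nil => simp
  | cons a t ih => simp [List.foldl_append, List.foldl_map, ih]

lemma pvOptMin_some {α : Type} (f : α → Int) (L : List α) (v : Int) :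
    L.foldl (fun acc p => match acc with
      | none => some (f p)
      | some b => if f p < b then some (f p) else some b) (some v)
      = some (L.foldl (fun m p => if f p < m then f p else m) v) := by
  induction L generalizing v with
  | nil => simp
  | cons a t ih =>
    simp only [List.foldl_cons]
    split_ifs with h <;> rw [ih]

lemma pvIntMin_le_init {α : Type} (f : α → Int) (L : List α) (v : Int) :
    L.foldl (fun m p => if f p < m then f p else m) v ≤ v := by
  induction L generalizing v with
  | nil => simp
  | cons a t ih =>
    simp only [List.foldl_cons]
    split_ifs with h
    · exact le_trans (ih _) (le_of_lt h)
    · exact ih _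

lemma pvIntMin_le_mem {α : Type} (f : α → Int) (L : List α) (v : Int) (p : α) (hp : p ∈ L) :
    L.foldl (fun m q => if f q < m then f q else m) v ≤ f p := by
  induction L generalizing v with
  | nil => simp at hp
  | cons a t ih =>
    simp only [List.foldl_cons]
    rcases List.mem_cons.1 hp with rfl | hp'
    · refine le_trans (pvIntMin_le_init f t _) ?_
      split_ifs with h <;> omega
    · exact ih _ hp'

lemma pvIntMin_ge {α : Type} (f : α → Int) (L : List α) (v : Int) (hv : 0 ≤ v)
    (hL : ∀ p ∈ L, 0 ≤ f p) :
    0 ≤ L.foldl (fun m p => if f p < m then f p else m) v := by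
  induction L generalizing v with
  | nil => simpa
  | cons a t ih =>
    simp only [List.foldl_cons]
    have ha := hL a (by simp)
    split_ifs with h
    · exact ih _ ha (fun p hp => hL p (by simp [hp]))
    · exact ih _ hv (fun p hp => hL p (by simp [hp]))

lemma pvAltFold_exact (grid pattern : List (List Int)) (i0 j0 : Int)
    (hi0 : i0 ∈ PySem.List.pyRange 0 ((grid.length : Int) - (pattern.length : Int) + 1) 1)
    (hj0 : j0 ∈ PySem.List.pyRange 0 (((grid.headD []).length : Int) - ((pattern.headD []).length : Int) + 1) 1)
    (hz : pvCount grid pattern i0 j0 = 0) :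
    (PySem.List.pyRange 0 ((grid.length : Int) - (pattern.length : Int) + 1) 1).foldl (fun acc i =>
      (PySem.List.pyRange 0 (((grid.headD []).length : Int) - ((pattern.headD []).length : Int) + 1) 1).foldl (fun acc j =>
        match acc with
        | none => some (pvCount grid pattern i j)
        | some b => if pvCount grid pattern i j < b then some (pvCount grid pattern i j) else some b) acc)
      (none : Option Int) = some 0 := by
  rw [pvFoldl_foldl_flatMap]
  set L := (PySem.List.pyRange 0 ((grid.length : Int) - (pattern.length : Int) + 1) 1).flatMap
      (fun i => (PySem.List.pyRange 0 (((grid.headD []).length : Int) - ((pattern.headD []).length : Int) + 1) 1).map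
        (fun j => (i, j))) with hL
  have hmem : (i0, j0) ∈ L := by
    rw [hL, List.mem_flatMap]
    exact ⟨i0, hi0, List.mem_map_of_mem hj0⟩
  obtain ⟨a, t, hcons⟩ := List.exists_cons_of_ne_nil (List.ne_nil_of_mem hmem)
  rw [hcons]
  simp only [List.foldl_cons]
  rw [pvOptMin_some (fun p : Int × Int => pvCount grid pattern p.1 p.2)]
  have hnn : ∀ p : Int × Int, 0 ≤ pvCount grid pattern p.1 p.2 :=
    fun p => pvCount_nonneg grid pattern p.1 p.2
  have hge : 0 ≤ t.foldl (fun m p => if pvCount grid pattern p.1 p.2 < m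
      then pvCount grid pattern p.1 p.2 else m) (pvCount grid pattern a.1 a.2) :=
    pvIntMin_ge _ _ _ (hnn a) (fun p _ => hnn p)
  have hle : t.foldl (fun m p => if pvCount grid pattern p.1 p.2 < m
      then pvCount grid pattern p.1 p.2 else m) (pvCount grid pattern a.1 a.2) ≤ 0 := by
    have hle' : t.foldl (fun m p => if pvCount grid pattern p.1 p.2 < m
        then pvCount grid pattern p.1 p.2 else m) (pvCount grid pattern a.1 a.2)
        ≤ pvCount grid pattern i0 j0 := by
      rw [hcons] at hmem
      rcases List.mem_cons.1 hmem with hw | hw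
      · have h1 := pvIntMin_le_init (fun p : Int × Int => pvCount grid pattern p.1 p.2) t
          (pvCount grid pattern a.1 a.2)
        have h2 : pvCount grid pattern a.1 a.2 = pvCount grid pattern i0 j0 := by rw [← hw]
        exact le_of_le_of_eq h1 h2
      · exact pvIntMin_le_mem (fun p : Int × Int => pvCount grid pattern p.1 p.2) t _ (i0, j0) hw
    rw [hz] at hle'
    exact hle'
  rw [le_antisymm hle hge]

-- ===== VERDICT (by name: the statement is the Claim_ definition above) =====
theorem find_pattern_spec : Claim_equal_find_pattern := by
  intro grid pattern _ hpre
  obtain ⟨hg0, hp0, hrlen, hdisj⟩ := hpre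
  unfold Spec_find_pattern
  simp only [find_pattern, find_pattern_alt]
  rcases hdisj with hpc | ⟨hgrow, hprow, hclen⟩
  · -- empty first pattern row: the exact scan succeeds at (0,0) without reading any cell
    have hi0 : (0 : Int) ∈ PySem.List.pyRange 0 ((grid.length : Int) - (pattern.length : Int) + 1) 1 := by
      rw [PySem.List.mem_pyRange_one]
      have : grid ≠ [] := hg0
      omega
    have hj0 : (0 : Int) ∈ PySem.List.pyRange 0 (((grid.headD []).length : Int) - ((pattern.headD []).length : Int) + 1) 1 := by
      rw [PySem.List.mem_pyRange_one]
      omega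
    have hz : pvCount grid pattern 0 0 = 0 := by
      rw [pvCount_eq_zero_iff]
      intro r hr c hc
      rw [PySem.List.mem_pyRange_one] at hc
      exfalso
      omega
    have hG : (PySem.List.pyRange 0 ((grid.length : Int) - (pattern.length : Int) + 1) 1).any (fun i =>
       (PySem.List.pyRange 0 (((grid.headD []).length : Int) - ((pattern.headD []).length : Int) + 1) 1).any (fun j =>
         (PySem.List.pyRange 0 (pattern.length : Int) 1).all (fun r =>
           (PySem.List.pyRange 0 ((pattern.headD []).length : Int) 1).all (fun c =>
             pvIdx (pvRegion grid i j (pattern.length : Int) ((pattern.headD []).length : Int)) r c == pvIdx pattern r c)))) = true := by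
      rw [List.any_eq_true]
      refine ⟨0, hi0, ?_⟩
      rw [List.any_eq_true]
      refine ⟨0, hj0, ?_⟩
      rw [List.all_eq_true]
      intro r hr
      rw [List.all_eq_true]
      intro c hc
      rw [PySem.List.mem_pyRange_one] at hc
      exfalso
      omega
    rw [if_pos hG, pvAltFold_exact grid pattern 0 0 hi0 hj0 hz]
    simp
  · have hbridge : ∀ i j : Int, 0 ≤ i → i + (pattern.length : Int) ≤ (grid.length : Int) →
        0 ≤ j → j + ((pattern.headD []).length : Int) ≤ ((grid.headD []).length : Int) →
        check_region (pvRegion grid i j (pattern.length : Int) ((pattern.headD []).length : Int)) pattern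
          = pvCount grid pattern i j := by
      intro i j hi hipr hj hjpc
      unfold check_region pvCount
      refine PySem.List.foldl_congr_mem _ _ _ _ ?_
      intro acc r hr
      rw [PySem.List.mem_pyRange_one] at hr
      refine PySem.List.foldl_congr_mem _ _ _ _ ?_
      intro acc2 c hc
      rw [PySem.List.mem_pyRange_one] at hc
      rw [pvIdx_region_eq grid i j r c pattern.length (pattern.headD []).length hi hj hr.1 hc.1
          hipr hr.2 hc.2 (fun row hrw => by have := hgrow row hrw; omega)]
    have hregbounds : ∀ i j : Int,
        i ∈ PySem.List.pyRange 0 ((grid.length : Int) - (pattern.length : Int) + 1) 1 →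
        j ∈ PySem.List.pyRange 0 (((grid.headD []).length : Int) - ((pattern.headD []).length : Int) + 1) 1 →
        0 ≤ i ∧ i + (pattern.length : Int) ≤ (grid.length : Int) ∧
        0 ≤ j ∧ j + ((pattern.headD []).length : Int) ≤ ((grid.headD []).length : Int) := by
      intro i j hi hj
      rw [PySem.List.mem_pyRange_one] at hi hj
      omega
    by_cases hG : (PySem.List.pyRange 0 ((grid.length : Int) - (pattern.length : Int) + 1) 1).any (fun i =>
         (PySem.List.pyRange 0 (((grid.headD []).length : Int) - ((pattern.headD []).length : Int) + 1) 1).any (fun j =>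
           (PySem.List.pyRange 0 (pattern.length : Int) 1).all (fun r =>
             (PySem.List.pyRange 0 ((pattern.headD []).length : Int) 1).all (fun c =>
               pvIdx (pvRegion grid i j (pattern.length : Int) ((pattern.headD []).length : Int)) r c == pvIdx pattern r c))))
    · -- exact-match case: B's running minimum is 0
      rw [if_pos hG]
      rw [List.any_eq_true] at hG
      obtain ⟨i0, hi0, hrest⟩ := hG
      rw [List.any_eq_true] at hrest
      obtain ⟨j0, hj0, hall⟩ := hrest
      have hb := hregbounds i0 j0 hi0 hj0
      have hz : pvCount grid pattern i0 j0 = 0 := by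
        rw [pvCount_eq_zero_iff]
        intro r hr c hc
        rw [List.all_eq_true] at hall
        have := hall r hr
        rw [List.all_eq_true] at this
        have := this c hc
        rw [beq_iff_eq] at this
        rw [PySem.List.mem_pyRange_one] at hr hc
        rw [← pvIdx_region_eq grid i0 j0 r c pattern.length (pattern.headD []).length hb.1 hb.2.2.1
            hr.1 hc.1 hb.2.1 hr.2 hc.2 (fun row hrw => by have := hgrow row hrw; omega)]
        exact this
      rw [pvAltFold_exact grid pattern i0 j0 hi0 hj0 hz]
      simp
    · -- no exact match: the two minimum folds agree placement by placement
      rw [if_neg hG]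
      have hfold : (PySem.List.pyRange 0 ((grid.length : Int) - (pattern.length : Int) + 1) 1).foldl (fun acc i =>
          (PySem.List.pyRange 0 (((grid.headD []).length : Int) - ((pattern.headD []).length : Int) + 1) 1).foldl (fun acc j =>
            match acc with
            | none => some (check_region (pvRegion grid i j (pattern.length : Int) ((pattern.headD []).length : Int)) pattern)
            | some m => some (min m (check_region (pvRegion grid i j (pattern.length : Int) ((pattern.headD []).length : Int)) pattern))) acc)
          (none : Option Int)
        = (PySem.List.pyRange 0 ((grid.length : Int) - (pattern.length : Int) + 1) 1).foldl (fun acc i =>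
          (PySem.List.pyRange 0 (((grid.headD []).length : Int) - ((pattern.headD []).length : Int) + 1) 1).foldl (fun acc j =>
            match acc with
            | none => some (pvCount grid pattern i j)
            | some b => if pvCount grid pattern i j < b then some (pvCount grid pattern i j) else some b) acc)
          (none : Option Int) := by
        refine PySem.List.foldl_congr_mem _ _ _ _ ?_
        intro acc i hi
        refine PySem.List.foldl_congr_mem _ _ _ _ ?_
        intro acc2 j hj
        have hb := hregbounds i j hi hj
        rw [hbridge i j hb.1 hb.2.1 hb.2.2.1 hb.2.2.2]
        cases acc2 with
        | none => rfl
        | some m =>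
          simp only [min_def]
          split_ifs <;> (first | rfl | omega)
      rw [hfold]
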